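-- pv_equiv track=rewrite | github.com/jbustarviejo/finance-python | analysis/CompanyAnalysisSVC.py | getMaxAndMin
-- ===== SOURCE A (Python) =====
-- def getMaxAndMin(predictions):
--     max = predictions[0]
--     min = predictions[0]
--     for i in range(1, len(predictions)):
--         if predictions[i]["rate"] is None:
--             continue
--         if max["rate"] < predictions[i]["rate"]:
--             max = predictions[i]
--         if min["rate"] > predictions[i]["rate"]:
--             min = predictions[i]
--
--     result = {}
--     result["max"] = max
--     result["min"] = min
--     return result;
-- ===== SOURCE B (Python) =====
-- def getMaxAndMin(predictions):
--     p0 = predictions[0]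
--     rated = [p for p in predictions[1:] if p["rate"] is not None]
--     if not rated:
--         return {"max": p0, "min": p0}
--     key = lambda p: p["rate"]
--     top, bot = max(rated, key=key), min(rated, key=key)
--     mx = top if p0["rate"] < top["rate"] else p0
--     mn = bot if bot["rate"] < p0["rate"] else p0
--     return {"max": mx, "min": mn}
-- ===== Notes on version B (the rewrite author's own statement) =====
-- stated objective: idiomatic
-- what changed: Replaces the single indexed loop maintaining two running records by filtering the rated tail entries once, taking builtin max/min with a key over them (first-extremal tie-breaking matches A's strict comparisons), and comparing the head element against those two extrema at the end.
import Mathlib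
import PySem

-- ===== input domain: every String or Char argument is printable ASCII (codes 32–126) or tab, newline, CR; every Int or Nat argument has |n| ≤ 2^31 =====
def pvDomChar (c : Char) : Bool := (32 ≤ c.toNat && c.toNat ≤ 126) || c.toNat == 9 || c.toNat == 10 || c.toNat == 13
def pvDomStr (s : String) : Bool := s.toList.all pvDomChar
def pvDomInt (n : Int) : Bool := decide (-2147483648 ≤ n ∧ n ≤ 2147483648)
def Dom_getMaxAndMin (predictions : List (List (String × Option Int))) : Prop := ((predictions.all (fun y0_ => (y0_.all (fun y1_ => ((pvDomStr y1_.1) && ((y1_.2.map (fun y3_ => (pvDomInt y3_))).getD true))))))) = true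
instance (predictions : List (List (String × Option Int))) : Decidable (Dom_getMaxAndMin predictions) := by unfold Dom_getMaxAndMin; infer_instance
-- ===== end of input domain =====

-- B builds the candidate pool once and uses builtin max/min with a key instead of A's
-- single indexed loop with two running records; equivalence is proved on Pre_ below.

-- ===== PORT A =====
-- Python's `max["rate"] < p["rate"]` raises TypeError when a None is compared; inside
-- Pre_ both sides are always ints there, so returning false on None is never reached.
def pvLtOpt (a b : Option Int) : Bool :=
  match a, b with
  | some x, some y => decide (x < y)
  | _, _ => false

def pvGtOpt (a b : Option Int) : Bool :=
  match a, b with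
  | some x, some y => decide (y < x)
  | _, _ => false

-- the loop body of A, transliterated: skip a None rate, then the two running updates
def pvStepA (s : List (String × Option Int) × List (String × Option Int))
    (pi : List (String × Option Int)) :
    List (String × Option Int) × List (String × Option Int) :=
  let r := PySem.Dict.getD ⟨pi⟩ "rate" none
  if r = none then s
  else
    let s := if pvLtOpt (PySem.Dict.getD ⟨s.1⟩ "rate" none) r then (pi, s.2) else s
    if pvGtOpt (PySem.Dict.getD ⟨s.2⟩ "rate" none) r then (s.1, pi) else s

def getMaxAndMin (predictions : List (List (String × Option Int))) : List (String × List (String × Option Int)) :=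
  let p0 := PySem.List.pyGetD predictions 0 []
  let st := (PySem.List.pyRange 1 (PySem.List.len predictions)).foldl
    (fun s i => pvStepA s (PySem.List.pyGetD predictions i [])) (p0, p0)
  [("max", st.1), ("min", st.2)]

-- ===== PORT B =====
-- key p = p["rate"]; inside Pre_ every rate actually compared is an int, so the
-- .getD 0 view of the Option value is exact there; the two-key result dict is the
-- two-entry list in insertion order ("max" first, as B builds it).
def pvKey (p : List (String × Option Int)) : Int := (PySem.Dict.getD ⟨p⟩ "rate" none).getD 0

def getMaxAndMin_alt (predictions : List (List (String × Option Int))) : List (String × List (String × Option Int)) :=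
  let p0 := PySem.List.pyGetD predictions 0 []
  let rated := (PySem.List.slice predictions (some 1)).filter
    (fun p => (PySem.Dict.getD ⟨p⟩ "rate" none).isSome)
  if rated.isEmpty then [("max", p0), ("min", p0)]
  else
    let top := (PySem.List.max? rated pvKey).getD []
    let bot := (PySem.List.min? rated pvKey).getD []
    let mx := if pvKey p0 < pvKey top then top else p0
    let mn := if pvKey bot < pvKey p0 then bot else p0
    [("max", mx), ("min", mn)]

-- ===== PRECONDITION & SPEC =====
-- Pre_ excludes exactly the inputs where A raises: the empty list (IndexError); a tail
-- element without a "rate" key (KeyError at predictions[i]["rate"]); and a non-None rate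
-- in the tail while the first element's "rate" is None or missing (TypeError resp.
-- KeyError at max["rate"] < predictions[i]["rate"]).
def Pre_getMaxAndMin (predictions : List (List (String × Option Int))) : Prop :=
  predictions ≠ [] ∧
  (∀ p ∈ predictions.tail, (PySem.Dict.get? ⟨p⟩ "rate").isSome = true) ∧
  ((∃ p ∈ predictions.tail, PySem.Dict.getD ⟨p⟩ "rate" none ≠ none) →
    PySem.Dict.getD ⟨predictions.headI⟩ "rate" none ≠ none)
instance (predictions : List (List (String × Option Int))) : Decidable (Pre_getMaxAndMin predictions) := by
  unfold Pre_getMaxAndMin; infer_instance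

def pvWitness_getMaxAndMin : (List (List (String × Option Int))) :=
  [[("rate", some 3)], [("rate", none)], [("rate", some 7)], [("rate", some (-2))]]

def Spec_getMaxAndMin (predictions : List (List (String × Option Int))) (out : List (String × List (String × Option Int))) : Prop := out = getMaxAndMin_alt predictions
instance (predictions : List (List (String × Option Int))) (out : List (String × List (String × Option Int))) : Decidable (Spec_getMaxAndMin predictions out) := by unfold Spec_getMaxAndMin; infer_instance

-- ===== CLAIM (what is proved, stated in full; the proofs are below) =====
def Claim_equal_getMaxAndMin : Prop := ∀ (predictions : List (List (String × Option Int))), Dom_getMaxAndMin predictions → Pre_getMaxAndMin predictions → Spec_getMaxAndMin predictions (getMaxAndMin predictions)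

-- ===== LEMMAS AND PROOFS =====
-- abbreviations for the proofs
def pvRate (p : List (String × Option Int)) : Option Int := PySem.Dict.getD ⟨p⟩ "rate" none

def pvStepMax (m p : List (String × Option Int)) : List (String × Option Int) :=
  if pvRate p = none then m else if pvLtOpt (pvRate m) (pvRate p) then p else m

def pvStepMin (m p : List (String × Option Int)) : List (String × Option Int) :=
  if pvRate p = none then m else if pvGtOpt (pvRate m) (pvRate p) then p else m

theorem pvStepA_eq (s : List (String × Option Int) × List (String × Option Int))
    (p : List (String × Option Int)) :
    pvStepA s p = (pvStepMax s.1 p, pvStepMin s.2 p) := by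
  simp only [pvStepA, pvStepMax, pvStepMin, pvRate]
  split_ifs <;> simp_all

theorem pvFoldA_split (t : List (List (String × Option Int)))
    (mx mn : List (String × Option Int)) :
    t.foldl pvStepA (mx, mn) = (t.foldl pvStepMax mx, t.foldl pvStepMin mn) := by
  induction t generalizing mx mn with
  | nil => rfl
  | cons p t ih => rw [List.foldl_cons, pvStepA_eq]; exact ih _ _

theorem pvFoldMax_filter (t : List (List (String × Option Int)))
    (m : List (String × Option Int)) (hm : pvRate m ≠ none) :
    t.foldl pvStepMax m =
      (t.filter (fun p => (pvRate p).isSome)).foldl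
        (fun b y => if pvKey b < pvKey y then y else b) m := by
  induction t generalizing m with
  | nil => rfl
  | cons p t ih =>
    by_cases hp : pvRate p = none
    · rw [List.foldl_cons]
      have h1 : pvStepMax m p = m := by simp [pvStepMax, hp]
      have h2 : (pvRate p).isSome = false := by simp [hp]
      rw [h1, List.filter_cons_of_neg (by simp [h2]), ih m hm]
    · obtain ⟨y, hy⟩ := Option.ne_none_iff_exists'.mp hp
      obtain ⟨x, hx⟩ := Option.ne_none_iff_exists'.mp hm
      have hcmp : pvLtOpt (pvRate m) (pvRate p) = decide (pvKey m < pvKey p) := by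
        rw [hx, hy]; simp [pvLtOpt, pvKey, pvRate] at hx hy ⊢
        rw [hx, hy]; rfl
      rw [List.foldl_cons, List.filter_cons_of_pos (by simp [hy]), List.foldl_cons]
      have hstep : pvStepMax m p = if pvKey m < pvKey p then p else m := by
        rw [pvStepMax, if_neg hp, hcmp]; split_ifs <;> simp_all
      rw [hstep]
      split_ifs with h
      · exact ih p hp
      · exact ih m hm

theorem pvFoldMin_filter (t : List (List (String × Option Int)))
    (m : List (String × Option Int)) (hm : pvRate m ≠ none) :
    t.foldl pvStepMin m =
      (t.filter (fun p => (pvRate p).isSome)).foldl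
        (fun b y => if pvKey y < pvKey b then y else b) m := by
  induction t generalizing m with
  | nil => rfl
  | cons p t ih =>
    by_cases hp : pvRate p = none
    · rw [List.foldl_cons]
      have h1 : pvStepMin m p = m := by simp [pvStepMin, hp]
      have h2 : (pvRate p).isSome = false := by simp [hp]
      rw [h1, List.filter_cons_of_neg (by simp [h2]), ih m hm]
    · obtain ⟨y, hy⟩ := Option.ne_none_iff_exists'.mp hp
      obtain ⟨x, hx⟩ := Option.ne_none_iff_exists'.mp hm
      have hcmp : pvGtOpt (pvRate m) (pvRate p) = decide (pvKey p < pvKey m) := by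
        rw [hx, hy]; simp [pvGtOpt, pvKey, pvRate] at hx hy ⊢
        rw [hx, hy]; rfl
      rw [List.foldl_cons, List.filter_cons_of_pos (by simp [hy]), List.foldl_cons]
      have hstep : pvStepMin m p = if pvKey p < pvKey m then p else m := by
        rw [pvStepMin, if_neg hp, hcmp]; split_ifs <;> simp_all
      rw [hstep]
      split_ifs with h
      · exact ih p hp
      · exact ih m hm

theorem pvMaxSome {α : Type} (key : α → Int) (l : List α) (m : α) :
    PySem.List.max? (m :: l) key = some (l.foldl (fun b y => if key b < key y then y else b) m) := by
  rw [PySem.List.max?, List.foldl_cons]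
  induction l generalizing m with
  | nil => rfl
  | cons x l ih =>
    rw [List.foldl_cons, List.foldl_cons]
    show List.foldl _ (if key m < key x then some x else some m) l = _
    split_ifs <;> exact ih _

theorem pvMinSome {α : Type} (key : α → Int) (l : List α) (m : α) :
    PySem.List.min? (m :: l) key = some (l.foldl (fun b y => if key y < key b then y else b) m) := by
  rw [PySem.List.min?, List.foldl_cons]
  induction l generalizing m with
  | nil => rfl
  | cons x l ih =>
    rw [List.foldl_cons, List.foldl_cons]
    show List.foldl _ (if key x < key m then some x else some m) l = _
    split_ifs <;> exact ih _

theorem pvFoldA_const (t : List (List (String × Option Int)))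
    (hall : ∀ p ∈ t, pvRate p = none)
    (s : List (String × Option Int) × List (String × Option Int)) :
    t.foldl pvStepA s = s := by
  induction t generalizing s with
  | nil => rfl
  | cons p t ih =>
    have hp := hall p (List.mem_cons_self ..)
    rw [List.foldl_cons]
    have hs : pvStepA s p = s := by simp [pvStepA, pvRate] at hp ⊢; simp [hp]
    rw [hs]
    exact ih (fun q hq => hall q (List.mem_cons_of_mem _ hq)) s

theorem pvSeedMax {α : Type} (key : α → Int) (rs : List α) :
    ∀ m r, (r :: rs).foldl (fun b y => if key b < key y then y else b) m =
      (if key m < key (rs.foldl (fun b y => if key b < key y then y else b) r)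
       then rs.foldl (fun b y => if key b < key y then y else b) r else m) := by
  induction rs with
  | nil => intro m r; simp
  | cons x rs ih =>
    intro m r
    have e1 := ih (if key m < key r then r else m) x
    rw [List.foldl_cons] at e1
    rw [List.foldl_cons, List.foldl_cons, e1, ih r x]
    split_ifs <;> first | rfl | omega

theorem pvSeedMin {α : Type} (key : α → Int) (rs : List α) :
    ∀ m r, (r :: rs).foldl (fun b y => if key y < key b then y else b) m =
      (if key (rs.foldl (fun b y => if key y < key b then y else b) r) < key m
       then rs.foldl (fun b y => if key y < key b then y else b) r else m) := by
  induction rs with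
  | nil => intro m r; simp
  | cons x rs ih =>
    intro m r
    have e1 := ih (if key r < key m then r else m) x
    rw [List.foldl_cons] at e1
    rw [List.foldl_cons, List.foldl_cons, e1, ih r x]
    split_ifs <;> first | rfl | omega

-- ===== VERDICT (by name: the statement is the Claim_ definition above) =====
theorem getMaxAndMin_spec : Claim_equal_getMaxAndMin := by
  intro preds _ hpre
  obtain ⟨hne, htail, himp⟩ := hpre
  obtain ⟨h, t, rfl⟩ : ∃ h t, preds = h :: t := by
    cases preds with
    | nil => exact absurd rfl hne
    | cons h t => exact ⟨h, t, rfl⟩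
  simp only [List.headI, List.tail_cons] at htail himp
  have hA : getMaxAndMin (h :: t) =
      (let st := t.foldl pvStepA (h, h); [("max", st.1), ("min", st.2)]) := by
    unfold getMaxAndMin
    rw [PySem.List.pyGetD_ofNat']
    simp only [List.getD_cons_zero]
    rw [PySem.List.foldl_pyRange_pyGetD (h :: t) ([] : List (String × Option Int)) pvStepA
      ((h, h)) (by norm_num : (0:Int) ≤ 1)]
    rfl
  unfold Spec_getMaxAndMin getMaxAndMin_alt
  rw [hA, pvFoldA_split, PySem.List.slice_from_one, PySem.List.pyGetD_ofNat']
  simp only [List.getD_cons_zero, List.tail_cons]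
  cases hfil : t.filter (fun p => (PySem.Dict.getD ⟨p⟩ "rate" none).isSome) with
  | nil =>
    have hall : ∀ p ∈ t, pvRate p = none := by
      intro p hp
      have := List.filter_eq_nil_iff.mp hfil p hp
      simpa [pvRate] using this
    have hconst := (pvFoldA_split t h h).symm.trans (pvFoldA_const t hall (h, h))
    have h1 : List.foldl pvStepMax h t = h := congrArg Prod.fst hconst
    have h2 : List.foldl pvStepMin h t = h := congrArg Prod.snd hconst
    rw [h1, h2]
    rfl
  | cons r rs =>
    have hrmem : r ∈ t.filter (fun p => (PySem.Dict.getD ⟨p⟩ "rate" none).isSome) := by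
      rw [hfil]; exact List.mem_cons_self ..
    have hr := List.mem_filter.mp hrmem
    have hh : pvRate h ≠ none := by
      apply himp
      exact ⟨r, hr.1, by simpa [Option.isSome_iff_ne_none] using hr.2⟩
    have hfil' : t.filter (fun p => (pvRate p).isSome) = r :: rs := by
      rw [← hfil]; rfl
    rw [pvFoldMax_filter t h hh, pvFoldMin_filter t h hh, hfil',
      pvSeedMax pvKey rs h r, pvSeedMin pvKey rs h r,
      pvMaxSome pvKey rs r, pvMinSome pvKey rs r]
    rfl
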